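-- pv_equiv track=rewrite | github.com/AP-MI-2021/lab-3-Croitoru-Alexandru | main.py | get_longest_prime_digits
-- ===== SOURCE A (Python) =====
-- def numere_prime(x):
--     if x < 2:
--         return False
--     for i in range(2, x // 2 + 1, 1):
--         if x % i == 0:
--             return False
--     return True
--
-- def cifre_prime(x):
--     while x > 0:
--         if numere_prime(x % 10) == True:
--             x = x // 10
--         else:
--             return False
--     return True
--
-- def get_longest_prime_digits(l):
--     length = 0
--     maxim = 0
--     indexfinal = 0
--     lst = []
--     for i in range(0, len(l), 1):
--         if cifre_prime(l[i]) == True: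
--             length = length + 1
--             if length > maxim:
--                 maxim = length
--                 indexfinal = i
--         else:
--             length = 0
--     for i in range( indexfinal - maxim + 1, indexfinal + 1, 1):
--         lst.append(l[i])
--     return lst
-- ===== SOURCE B (Python) =====
-- def numere_prime(x):
--     if x < 2:
--         return False
--     for i in range(2, x // 2 + 1, 1):
--         if x % i == 0:
--             return False
--     return True
--
-- def cifre_prime(x):
--     while x > 0:
--         if numere_prime(x % 10) == True:
--             x = x // 10
--         else:
--             return False
--     return True
--
-- def get_longest_prime_digits(l):
--     best = []
--     run = []
--     for x in l:
--         if cifre_prime(x):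
--             run.append(x)
--         else:
--             if len(run) > len(best):
--                 best = run
--             run = []
--     if len(run) > len(best):
--         best = run
--     return best
-- ===== Notes on version B (the rewrite author's own statement) =====
-- stated objective: simpler
-- what changed: B does a single pass that collects each maximal prime-digit run as a list and compares whole runs at run boundaries (strict > so the first longest run wins), replacing A's length/maxim/indexfinal counter bookkeeping plus a second index loop that reconstructs the winning run from indices.
import Mathlib
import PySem

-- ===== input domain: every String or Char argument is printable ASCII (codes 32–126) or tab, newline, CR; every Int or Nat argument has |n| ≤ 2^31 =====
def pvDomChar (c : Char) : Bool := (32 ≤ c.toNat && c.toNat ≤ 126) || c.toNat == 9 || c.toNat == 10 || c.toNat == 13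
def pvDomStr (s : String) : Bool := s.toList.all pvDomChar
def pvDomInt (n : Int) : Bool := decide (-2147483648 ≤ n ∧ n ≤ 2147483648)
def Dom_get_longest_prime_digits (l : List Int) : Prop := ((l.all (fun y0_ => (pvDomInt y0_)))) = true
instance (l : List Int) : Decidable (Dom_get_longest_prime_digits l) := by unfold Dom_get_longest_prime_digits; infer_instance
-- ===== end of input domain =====

-- B: a single pass that collects each maximal run and compares whole runs at their
-- boundaries (first longest run wins), instead of A's length/maxim/indexfinal counter
-- bookkeeping followed by a second index loop reconstructing the run (objective: simpler).

-- ===== PORT A =====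
-- module helpers (B's Python reuses them unchanged)
def numere_prime (x : Int) : Bool :=
  if x < 2 then false
  else
    -- early-return divisor loop rendered as .all over the same range
    (PySem.List.pyRange 2 (PySem.Int.floordiv x 2 + 1) 1).all
      (fun i => !(PySem.Int.mod x i == 0))

lemma cifre_prime_dec (x : Int) (h : 0 < x) :
    (PySem.Int.floordiv x 10).toNat < x.toNat := by
  rw [PySem.Int.floordiv_eq_ediv_of_pos (by norm_num : (0:Int) < 10)]
  omega

def cifre_prime (x : Int) : Bool :=
  if h : 0 < x then
    if numere_prime (PySem.Int.mod x 10) = true then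
      cifre_prime (PySem.Int.floordiv x 10)
    else false
  else true
termination_by x.toNat
decreasing_by exact cifre_prime_dec x h

def get_longest_prime_digits (l : List Int) : List Int :=
  -- loop indices are always in range, so pyGetD is exact for l[i]
  let s : Int × Int × Int :=
    (PySem.List.pyRange 0 (l.length : Int) 1).foldl
      (fun (st : Int × Int × Int) i =>
        let (length, maxim, indexfinal) := st
        if cifre_prime (PySem.List.pyGetD l i 0) = true then
          if length + 1 > maxim then (length + 1, length + 1, i)
          else (length + 1, maxim, indexfinal)
        else (0, maxim, indexfinal))
      (0, 0, 0)
  (PySem.List.pyRange (s.2.2 - s.2.1 + 1) (s.2.2 + 1) 1).foldl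
    (fun lst i => lst ++ [PySem.List.pyGetD l i 0]) []

-- ===== PORT B =====
def get_longest_prime_digits_alt (l : List Int) : List Int :=
  let t : List Int × List Int :=
    l.foldl
      (fun (st : List Int × List Int) x =>
        if cifre_prime x = true then (st.1, st.2 ++ [x])
        else if st.2.length > st.1.length then (st.2, []) else (st.1, []))
      ([], [])
  if t.2.length > t.1.length then t.2 else t.1

-- ===== PRECONDITION & SPEC =====
def Spec_get_longest_prime_digits (l : List Int) (out : List Int) : Prop := out = get_longest_prime_digits_alt l
instance (l : List Int) (out : List Int) : Decidable (Spec_get_longest_prime_digits l out) := by unfold Spec_get_longest_prime_digits; infer_instance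

-- ===== CLAIM (what is proved, stated in full; the proofs are below) =====
def Claim_equal_get_longest_prime_digits : Prop := ∀ (l : List Int), Dom_get_longest_prime_digits l → Spec_get_longest_prime_digits l (get_longest_prime_digits l)

-- ===== LEMMAS AND PROOFS =====

-- A's first-loop step, on (index, element) pairs
def pvStepA (st : Int × Int × Int) (p : Int × Int) : Int × Int × Int :=
  let (length, maxim, indexfinal) := st
  if cifre_prime p.2 = true then
    if length + 1 > maxim then (length + 1, length + 1, p.1)
    else (length + 1, maxim, indexfinal)
  else (0, maxim, indexfinal)

-- B's step: state = (best complete run so far, current run)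
def pvStepB (st : List Int × List Int) (x : Int) : List Int × List Int :=
  if cifre_prime x = true then (st.1, st.2 ++ [x])
  else if st.2.length > st.1.length then (st.2, []) else (st.1, [])

lemma pyGetD_append_left (l t : List Int) (i : Int) (d : Int)
    (h0 : 0 ≤ i) (h : i < (l.length : Int)) :
    PySem.List.pyGetD (l ++ t) i d = PySem.List.pyGetD l i d := by
  rw [PySem.List.pyGetD_eq_getElem (l ++ t) d h0
        (by simp only [List.length_append]; omega),
      PySem.List.pyGetD_eq_getElem l d h0 h]
  exact List.getElem_append_left (by omega)

lemma pv_map_stable (l : List Int) (x : Int) (a b : Int)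
    (ha : 0 ≤ a) (hb : b ≤ (l.length : Int)) :
    (PySem.List.pyRange a b 1).map (fun i => PySem.List.pyGetD (l ++ [x]) i 0) =
      (PySem.List.pyRange a b 1).map (fun i => PySem.List.pyGetD l i 0) := by
  apply List.map_congr_left
  intro i hi
  rw [PySem.List.mem_pyRange_one] at hi
  exact pyGetD_append_left l [x] i 0 (by omega) (by omega)

-- the loop invariant, by snoc induction: with s = A's first-loop state and
-- t = (best, run) = B's state,
--   s.length = |run|, s.maxim = max |best| |run|, index bounds,
--   run is a suffix of l, and A's reconstruction slice equals B's final choice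
lemma pv_invariant (l : List Int) :
    (((PySem.List.enumerate l 0).foldl pvStepA (0, 0, 0)).1
        = (((l.foldl pvStepB ([], [])).2.length : Int))) ∧
    (((PySem.List.enumerate l 0).foldl pvStepA (0, 0, 0)).2.1
        = ((max (l.foldl pvStepB ([], [])).1.length (l.foldl pvStepB ([], [])).2.length : Nat) : Int)) ∧
    ((((PySem.List.enumerate l 0).foldl pvStepA (0, 0, 0)).2.1 = 0 ∧
      ((PySem.List.enumerate l 0).foldl pvStepA (0, 0, 0)).2.2 = 0) ∨
      (0 < ((PySem.List.enumerate l 0).foldl pvStepA (0, 0, 0)).2.1 ∧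
       0 ≤ ((PySem.List.enumerate l 0).foldl pvStepA (0, 0, 0)).2.2
            - ((PySem.List.enumerate l 0).foldl pvStepA (0, 0, 0)).2.1 + 1 ∧
       ((PySem.List.enumerate l 0).foldl pvStepA (0, 0, 0)).2.2 + 1 ≤ (l.length : Int))) ∧
    ((l.foldl pvStepB ([], [])).2.length ≤ l.length ∧
      l.drop (l.length - (l.foldl pvStepB ([], [])).2.length) = (l.foldl pvStepB ([], [])).2) ∧
    ((PySem.List.pyRange
        (((PySem.List.enumerate l 0).foldl pvStepA (0, 0, 0)).2.2
          - ((PySem.List.enumerate l 0).foldl pvStepA (0, 0, 0)).2.1 + 1)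
        (((PySem.List.enumerate l 0).foldl pvStepA (0, 0, 0)).2.2 + 1) 1).map
        (fun i => PySem.List.pyGetD l i 0)
      = (if (l.foldl pvStepB ([], [])).2.length > (l.foldl pvStepB ([], [])).1.length
          then (l.foldl pvStepB ([], [])).2 else (l.foldl pvStepB ([], [])).1)) := by
  induction l using List.reverseRecOn with
  | nil =>
      refine ⟨rfl, rfl, Or.inl ⟨rfl, rfl⟩, ⟨Nat.le_refl _, rfl⟩, ?_⟩
      rw [PySem.List.pyRange_one_eq_nil (by norm_num)]
      rfl
  | append_singleton l x ih =>
      obtain ⟨ih1, ih2, ih3, ⟨ih4a, ih4b⟩, ih5⟩ := ih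
      set s := (PySem.List.enumerate l 0).foldl pvStepA (0, 0, 0) with hs
      set t := l.foldl pvStepB ([], []) with ht
      have henum : PySem.List.enumerate (l ++ [x]) 0
          = PySem.List.enumerate l 0 ++ [((l.length : Int), x)] := by
        rw [PySem.List.enumerate_append]
        simp [PySem.List.enumerate_cons, PySem.List.enumerate_nil]
      have hfoldA : (PySem.List.enumerate (l ++ [x]) 0).foldl pvStepA (0, 0, 0)
          = pvStepA s ((l.length : Int), x) := by
        rw [henum, List.foldl_append]; rfl
      have hfoldB : (l ++ [x]).foldl pvStepB ([], []) = pvStepB t x := by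
        rw [List.foldl_append]; rfl
      rw [hfoldA, hfoldB]
      obtain ⟨len, max', idx⟩ := s
      obtain ⟨best, run⟩ := t
      simp only at ih1 ih2 ih3 ih4a ih4b ih5
      by_cases hx : cifre_prime x = true
      · -- prime-digit element: the current run extends; B's best is untouched
        have hdrop : (l ++ [x]).drop ((l ++ [x]).length - (run ++ [x]).length)
            = run ++ [x] := by
          rw [List.drop_append]
          simp only [List.length_append, List.length_singleton]
          have h1 : l.length + 1 - (run.length + 1) = l.length - run.length := by omega
          rw [h1]
          have h2 : l.length - run.length - l.length = 0 := by omega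
          rw [h2, ih4b, List.drop_zero]
        by_cases hgt : len + 1 > max'
        · -- A records a new maximum: it is the (extended) current run
          simp only [pvStepA, pvStepB, hx, if_pos hgt, if_true]
          have hrb : (run ++ [x]).length > best.length := by
            simp only [List.length_append, List.length_singleton, Nat.cast_max] at *; omega
          refine ⟨by simp only [List.length_append, List.length_singleton, Nat.cast_max] at *; omega,
            by simp only [List.length_append, List.length_singleton, Nat.cast_max] at *; omega,
            Or.inr ⟨by omega, by omega, by simp only [List.length_append, List.length_singleton, Nat.cast_max] at *; omega⟩,
            ⟨by simp only [List.length_append, List.length_singleton, Nat.cast_max] at *; omega, hdrop⟩, ?_⟩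
          have hr : ((l.length : Int) - (len + 1) + 1) = ((l.length : Int) - run.length) := by
            omega
          have hr2 : ((l.length : Int) + 1) = (((l ++ [x]).length : Int)) := by
            simp only [List.length_append, List.length_singleton, Nat.cast_max] at *; omega
          simp only [hr, hr2]
          rw [PySem.List.map_pyGetD_pyRange' (l ++ [x]) 0 (by omega)]
          have he : ((l.length : Int) - (run.length : Int)).toNat
              = (l ++ [x]).length - (run ++ [x]).length := by
            simp only [List.length_append, List.length_singleton]; omega
          rw [he, hdrop, if_pos hrb]
        · -- A's maximum is unchanged; B's pending run is still shorter than best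
          simp only [pvStepA, pvStepB, hx, if_neg hgt, if_true]
          have hrb : ¬ (run ++ [x]).length > best.length := by
            simp only [List.length_append, List.length_singleton, Nat.cast_max] at *; omega
          have hrb0 : ¬ run.length > best.length := by
            simp only [List.length_append, List.length_singleton, Nat.cast_max] at *; omega
          have h3 := ih3.resolve_left (by rintro ⟨h, -⟩; omega)
          refine ⟨by simp only [List.length_append, List.length_singleton, Nat.cast_max] at *; omega,
            by simp only [List.length_append, List.length_singleton, Nat.cast_max] at *; omega,
            Or.inr ⟨h3.1, h3.2.1, by simp only [List.length_append, List.length_singleton, Nat.cast_max] at *; omega⟩,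
            ⟨by simp only [List.length_append, List.length_singleton, Nat.cast_max] at *; omega, hdrop⟩, ?_⟩
          rw [pv_map_stable l x _ _ h3.2.1 (by omega), if_neg hrb]
          rw [if_neg hrb0] at ih5
          exact ih5
      · -- non-prime-digit element: the run closes and is compared against best
        simp only [pvStepA, pvStepB, hx, if_false, Bool.false_eq_true]
        by_cases hr : run.length > best.length
        · simp only [if_pos hr]
          refine ⟨by simp, by simp; omega, ?_, ⟨by simp, by simp⟩, ?_⟩
          · rcases ih3 with h | h
            · exact Or.inl h
            · exact Or.inr ⟨h.1, h.2.1, by simp only [List.length_append, List.length_singleton, Nat.cast_max] at *; omega⟩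
          · rcases ih3 with ⟨hm, hi⟩ | h
            · -- empty maximum so far: both sides are []
              exfalso
              have : run.length = 0 ∧ best.length = 0 := by omega
              omega
            · rw [pv_map_stable l x _ _ h.2.1 (by omega), if_pos hr] at *
              simpa using ih5
        · simp only [if_neg hr]
          refine ⟨by simp, by simp; omega, ?_, ⟨by simp, by simp⟩, ?_⟩
          · rcases ih3 with h | h
            · exact Or.inl h
            · exact Or.inr ⟨h.1, h.2.1, by simp only [List.length_append, List.length_singleton, Nat.cast_max] at *; omega⟩
          · rcases ih3 with ⟨hm, hi⟩ | h
            · rw [hm, hi]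
              rw [PySem.List.pyRange_one_eq_nil (by norm_num)]
              rw [hm, hi] at ih5
              rw [PySem.List.pyRange_one_eq_nil (by norm_num), if_neg hr] at ih5
              simpa using ih5.symm
            · rw [pv_map_stable l x _ _ h.2.1 (by omega), if_neg hr] at *
              simpa using ih5

lemma pv_A_eq_enum (l : List Int) :
    get_longest_prime_digits l =
      (PySem.List.pyRange
        (((PySem.List.enumerate l 0).foldl pvStepA (0, 0, 0)).2.2
          - ((PySem.List.enumerate l 0).foldl pvStepA (0, 0, 0)).2.1 + 1)
        (((PySem.List.enumerate l 0).foldl pvStepA (0, 0, 0)).2.2 + 1) 1).foldl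
        (fun lst i => lst ++ [PySem.List.pyGetD l i 0]) [] := by
  unfold get_longest_prime_digits
  rw [show (PySem.List.enumerate l 0 : List (Int × Int))
        = (PySem.List.pyRange 0 (PySem.List.len l) 1).map
            (fun j => (j, PySem.List.pyGetD l j 0)) from
      PySem.List.enumerate_eq_map_pyRange l 0,
    List.foldl_map]
  rfl

lemma pv_B_eq_fold (l : List Int) :
    get_longest_prime_digits_alt l =
      (if (l.foldl pvStepB ([], [])).2.length > (l.foldl pvStepB ([], [])).1.length
        then (l.foldl pvStepB ([], [])).2 else (l.foldl pvStepB ([], [])).1) := rfl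

-- ===== VERDICT (by name: the statement is the Claim_ definition above) =====
theorem get_longest_prime_digits_spec : Claim_equal_get_longest_prime_digits := by
  intro l _
  unfold Spec_get_longest_prime_digits
  rw [pv_A_eq_enum, pv_B_eq_fold,
    PySem.List.foldl_append_singleton_eq_map (fun i => PySem.List.pyGetD l i 0)]
  simpa using (pv_invariant l).2.2.2.2
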